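-- pv_equiv track=rewrite | github.com/Globber11/Klassworks | Islands/island_generator.py | calculate_area_and_perimeter
-- ===== SOURCE A (Python) =====
-- def calculate_area_and_perimeter(matrix):
--     area = 0
--     perimeter = 0
--     size = len(matrix)
--
--     for i in range(size):
--         for j in range(size):
--             if matrix[i][j] not in ['~', ' ']:  # Проверяем только клетки с высотой
--                 area += 1
--                 if i == 0 or matrix[i - 1][j] == '~':  # Сверху
--                     perimeter += 1
--                 if i == size - 1 or matrix[i + 1][j] == '~':  # Снизу
--                     perimeter += 1
--                 if j == 0 or matrix[i][j - 1] == '~':  # Слева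
--                     perimeter += 1
--                 if j == size - 1 or matrix[i][j + 1] == '~':  # Справа
--                     perimeter += 1
--
--     return area, perimeter
-- ===== SOURCE B (Python) =====
-- def calculate_area_and_perimeter(matrix):
--     size = len(matrix)
--     grid = [[row[j] for j in range(size)] for row in matrix]
--
--     def land(c):
--         return c != '~' and c != ' '
--
--     def transitions(line):
--         padded = ['~'] + list(line) + ['~']
--         return sum(1 for a, b in zip(padded, padded[1:])
--                    if (land(a) and b == '~') or (a == '~' and land(b)))
--
--     area = sum(len([c for c in row if land(c)]) for row in grid)
--     perimeter = sum(transitions(row) for row in grid) + \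
--                 sum(transitions(col) for col in zip(*grid))
--     return area, perimeter
-- ===== Notes on version B (the rewrite author's own statement) =====
-- stated objective: alternative
-- what changed: B counts boundary edges instead of cell sides: it extracts the size x size square, then counts land/'~' transitions in each '~'-padded row and in each '~'-padded column of the transposed grid (zip(*grid)), with area as a per-row land count; A instead keeps a running accumulator and tests the four neighbours of every cell.
import Mathlib
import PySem

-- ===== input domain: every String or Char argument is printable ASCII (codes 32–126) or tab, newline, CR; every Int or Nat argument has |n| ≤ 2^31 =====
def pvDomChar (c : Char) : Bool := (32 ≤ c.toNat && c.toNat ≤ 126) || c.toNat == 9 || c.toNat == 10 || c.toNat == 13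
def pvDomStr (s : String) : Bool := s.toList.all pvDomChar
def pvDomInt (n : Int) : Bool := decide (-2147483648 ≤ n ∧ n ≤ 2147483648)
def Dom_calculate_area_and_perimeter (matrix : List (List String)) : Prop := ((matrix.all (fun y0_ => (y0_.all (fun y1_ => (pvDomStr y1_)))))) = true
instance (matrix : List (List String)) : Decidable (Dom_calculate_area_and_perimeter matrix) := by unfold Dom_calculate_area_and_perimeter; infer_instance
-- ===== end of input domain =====

-- B counts boundary EDGES instead of cell sides: it truncates to the size×size square, then for
-- each row and each column of the transposed grid counts land/'~' transitions in the
-- '~'-padded line; alternative algorithm, same asymptotic cost.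

-- matrix[i][j] (port A; in range for every access the claim covers, see Pre_)
def pvCell (matrix : List (List String)) (i j : Int) : String :=
  PySem.List.pyGetD (PySem.List.pyGetD matrix i []) j ""

-- ===== PORT A =====
def calculate_area_and_perimeter (matrix : List (List String)) : Int × Int :=
  let size : Int := matrix.length
  (PySem.List.pyRange 0 size 1).foldl (fun st i =>
    (PySem.List.pyRange 0 size 1).foldl (fun (st : Int × Int) j =>
      if ¬(pvCell matrix i j = "~" ∨ pvCell matrix i j = " ") then
        let area := st.1 + 1
        let p := st.2
        let p := if i = 0 ∨ pvCell matrix (i - 1) j = "~" then p + 1 else p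
        let p := if i = size - 1 ∨ pvCell matrix (i + 1) j = "~" then p + 1 else p
        let p := if j = 0 ∨ pvCell matrix i (j - 1) = "~" then p + 1 else p
        let p := if j = size - 1 ∨ pvCell matrix i (j + 1) = "~" then p + 1 else p
        (area, p)
      else st) st) ((0 : Int), (0 : Int))

-- ===== PORT B =====
def pvLand (c : String) : Bool := c != "~" && c != " "

-- number of land/'~' transitions in the '~'-padded line (Source B's 'transitions')
def pvTransitions (line : List String) : Int :=
  let padded : List String := "~" :: line ++ ["~"]
  ((padded.zip padded.tail).filter
    (fun p => (pvLand p.1 && p.2 == "~") || (p.1 == "~" && pvLand p.2))).length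

-- zip(*rows): fuel = length of the first row bounds the length of the zip
def pvTranspose : Nat → List (List String) → List (List String)
  | 0, _ => []
  | n + 1, rows =>
    if rows.isEmpty then []
    else if rows.all (fun r => !r.isEmpty) then
      (rows.map (fun r => r.headD "")) :: pvTranspose n (rows.map List.tail)
    else []

def calculate_area_and_perimeter_alt (matrix : List (List String)) : Int × Int :=
  let size := matrix.length
  let grid := matrix.map (fun row =>
    (PySem.List.pyRange 0 (size : Int) 1).map (fun j => PySem.List.pyGetD row j ""))
  let area : Int := (grid.map (fun row => ((row.filter pvLand).length : Int))).sum
  let cols := pvTranspose (grid.headD []).length grid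
  let perimeter : Int := (grid.map pvTransitions).sum + (cols.map pvTransitions).sum
  (area, perimeter)

-- ===== PRECONDITION & SPEC =====
-- Pre_ excludes exactly the matrices with a row shorter than len(matrix), on which the
-- Python A raises IndexError (it indexes every row at all columns 0..len(matrix)-1).
def Pre_calculate_area_and_perimeter (matrix : List (List String)) : Prop :=
  ∀ row ∈ matrix, matrix.length ≤ row.length
instance (matrix : List (List String)) : Decidable (Pre_calculate_area_and_perimeter matrix) := by
  unfold Pre_calculate_area_and_perimeter; infer_instance

def pvWitness_calculate_area_and_perimeter : List (List String) := [["#", "~"], ["~", "~"]]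

def Spec_calculate_area_and_perimeter (matrix : List (List String)) (out : Int × Int) : Prop := out = calculate_area_and_perimeter_alt matrix
instance (matrix : List (List String)) (out : Int × Int) : Decidable (Spec_calculate_area_and_perimeter matrix out) := by unfold Spec_calculate_area_and_perimeter; infer_instance

-- ===== CLAIM (what is proved, stated in full; the proofs are below) =====
def Claim_equal_calculate_area_and_perimeter : Prop := ∀ (matrix : List (List String)), Dom_calculate_area_and_perimeter matrix → Pre_calculate_area_and_perimeter matrix → Spec_calculate_area_and_perimeter matrix (calculate_area_and_perimeter matrix)

-- ===== LEMMAS AND PROOFS =====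

-- matrix[i][j] with Nat indices
def pvCellN (matrix : List (List String)) (i j : Nat) : String :=
  (matrix.getD i []).getD j ""

-- A's per-cell area and perimeter increments
def pvA1 (matrix : List (List String)) (i j : Int) : Int :=
  if ¬(pvCell matrix i j = "~" ∨ pvCell matrix i j = " ") then 1 else 0

def pvA2 (matrix : List (List String)) (size i j : Int) : Int :=
  if ¬(pvCell matrix i j = "~" ∨ pvCell matrix i j = " ") then
    (if i = 0 ∨ pvCell matrix (i - 1) j = "~" then 1 else 0)
    + (if i = size - 1 ∨ pvCell matrix (i + 1) j = "~" then 1 else 0)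
    + (if j = 0 ∨ pvCell matrix i (j - 1) = "~" then 1 else 0)
    + (if j = size - 1 ∨ pvCell matrix i (j + 1) = "~" then 1 else 0)
  else 0

lemma pvBody_eq (matrix : List (List String)) (size i j : Int) (st : Int × Int) :
    (if ¬(pvCell matrix i j = "~" ∨ pvCell matrix i j = " ") then
        let area := st.1 + 1
        let p := st.2
        let p := if i = 0 ∨ pvCell matrix (i - 1) j = "~" then p + 1 else p
        let p := if i = size - 1 ∨ pvCell matrix (i + 1) j = "~" then p + 1 else p
        let p := if j = 0 ∨ pvCell matrix i (j - 1) = "~" then p + 1 else p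
        let p := if j = size - 1 ∨ pvCell matrix i (j + 1) = "~" then p + 1 else p
        (area, p)
      else st)
    = (st.1 + pvA1 matrix i j, st.2 + pvA2 matrix size i j) := by
  unfold pvA1 pvA2
  by_cases h : pvCell matrix i j = "~" ∨ pvCell matrix i j = " "
  · simp [h]
  · simp only [h, not_false_eq_true, if_pos]
    refine Prod.ext rfl ?_
    split_ifs <;> push_cast <;> ring

lemma pvFoldl_pair_add (f g : Int → Int) (l : List Int) (st : Int × Int) :
    l.foldl (fun st x => (st.1 + f x, st.2 + g x)) st
      = (st.1 + (l.map f).sum, st.2 + (l.map g).sum) := by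
  induction l generalizing st with
  | nil => simp
  | cons x t ih => simp [ih]; constructor <;> ring

lemma pvSum_listRange (g : Nat → Int) (n : Nat) :
    ((List.range n).map g).sum = ∑ i ∈ Finset.range n, g i := rfl

-- generic: list sum of a map as an index sum
lemma pvSum_map_getD {α : Type} (l : List α) (f : α → Int) (d : α) :
    (l.map f).sum = ∑ i ∈ Finset.range l.length, f (l.getD i d) := by
  induction l with
  | nil => simp
  | cons x t ih =>
    simp only [List.map_cons, List.sum_cons, List.length_cons, Finset.sum_range_succ', ih]
    simp
    ring

-- filter length as an index sum of 0/1
lemma pvFilter_len (l : List String) (p : String → Bool) :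
    ((l.filter p).length : Int)
      = ∑ j ∈ Finset.range l.length, (if p (l.getD j "") then (1 : Int) else 0) := by
  induction l with
  | nil => simp
  | cons x t ih =>
    rw [List.length_cons, Finset.sum_range_succ']
    simp only [List.getD_cons_succ, List.getD_cons_zero, ← ih]
    by_cases h : p x <;> simp [h] <;> ring

-- the pair predicate of pvTransitions, recursively along the line
def pvG (a : String) (l : List String) : Int :=
  match l with
  | [] => if pvLand a then 1 else 0
  | b :: t => (if (pvLand a && b == "~") || (a == "~" && pvLand b) then 1 else 0) + pvG b t

lemma pvTransitions_eq_G (l : List String) : pvTransitions l = pvG "~" l := by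
  suffices h : ∀ (a : String) (l : List String),
      ((((a :: (l ++ ["~"])).zip (l ++ ["~"])).filter
        (fun p => (pvLand p.1 && p.2 == "~") || (p.1 == "~" && pvLand p.2))).length : Int)
      = pvG a l by
    have := h "~" l
    unfold pvTransitions
    simpa using this
  intro a l
  induction l generalizing a with
  | nil =>
    by_cases h : pvLand a
    · simp [pvG, h]
    · simp [pvG, h]
      intro h2; subst h2; rfl
  | cons b t ih =>
    simp only [List.cons_append, List.zip_cons_cons, List.filter_cons, pvG, ← ih b]
    by_cases h : (pvLand a && b == "~") || (a == "~" && pvLand b) <;>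
      simp [h] <;> ring

-- per-cell contribution of a line, with left context a and '~' default at the right end
def pvContrib (a : String) (l : List String) (j : Nat) : Int :=
  if pvLand (l.getD j "") then
    (if (if j = 0 then a else l.getD (j - 1) "") = "~" then 1 else 0)
    + (if l.getD (j + 1) "~" = "~" then 1 else 0)
  else 0

lemma pvG_eq_sum (l : List String) (a : String) :
    pvG a l = (if pvLand a ∧ l.getD 0 "~" = "~" then 1 else 0)
            + ∑ j ∈ Finset.range l.length, pvContrib a l j := by
  induction l generalizing a with
  | nil => by_cases h : pvLand a <;> simp [pvG, h]
  | cons b t ih =>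
    rw [List.length_cons, Finset.sum_range_succ']
    have hshift : ∀ j : Nat, pvContrib a (b :: t) (j + 1) = pvContrib b t j := by
      intro j
      unfold pvContrib
      cases j <;> simp
    simp only [hshift]
    rw [pvG, ih b]
    have hland : ¬ (pvLand "~" = true) := by decide
    have hland2 : pvLand "~" = false := rfl
    have hc0 : pvContrib a (b :: t) 0
        = if pvLand b then (if a = "~" then (1:Int) else 0) + (if t.getD 0 "~" = "~" then 1 else 0) else 0 := by
      unfold pvContrib
      simp
    rw [hc0]
    have hb : (b :: t).getD 0 "~" = b := rfl
    rw [hb]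
    by_cases ha : pvLand a <;> by_cases hb' : pvLand b <;>
      by_cases hab : a = "~" <;> by_cases hbb : b = "~" <;>
        by_cases ht : t.getD 0 "~" = "~" <;>
          first
          | (exfalso; subst hab; exact hland ha)
          | (exfalso; subst hbb; exact hland hb')
          | (simp [ha, hb', hab, hbb, ht, hland2] <;> ring)

-- zip(*rows) for a rectangular nonempty rows
lemma pvTranspose_eq (m : Nat) :
    ∀ (rows : List (List String)), rows ≠ [] → (∀ r ∈ rows, r.length = m) →
      pvTranspose m rows = (List.range m).map (fun j => rows.map (fun r => r.getD j "")) := by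
  induction m with
  | zero => intro rows _ _; simp [pvTranspose]
  | succ m ih =>
    intro rows hne hlen
    have h1 : rows.isEmpty = false := by simpa using hne
    have h2 : rows.all (fun r => !r.isEmpty) = true := by
      simp only [List.all_eq_true]
      intro r hr
      have := hlen r hr
      cases r with
      | nil => simp at this
      | cons x t => simp
    rw [pvTranspose, h1]
    simp only [Bool.false_eq_true, if_false, h2, if_true]
    have htne : rows.map List.tail ≠ [] := by simpa using hne
    have htlen : ∀ r ∈ rows.map List.tail, r.length = m := by
      intro r hr
      simp only [List.mem_map] at hr
      obtain ⟨r0, hr0, rfl⟩ := hr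
      have := hlen r0 hr0
      simp [List.length_tail, this]
    rw [ih (rows.map List.tail) htne htlen]
    rw [List.range_succ_eq_map]
    simp only [List.map_cons, List.map_map]
    congr 1
    · refine List.map_congr_left ?_
      intro r _
      cases r <;> rfl
    · refine List.map_congr_left ?_
      intro j _
      simp only [Function.comp]
      refine List.map_congr_left ?_
      intro r _
      cases r <;> rfl

-- row i and column j of the truncated grid
def pvRowT (matrix : List (List String)) (n i : Nat) : List String :=
  (matrix.getD i []).take n

def pvColT (matrix : List (List String)) (n j : Nat) : List String :=
  (matrix.map (fun r => r.take n)).map (fun r => r.getD j "")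

lemma pvGetD_map {α β : Type} (f : α → β) (l : List α) (i : Nat) (d : β) (d' : α)
    (h : i < l.length) : (l.map f).getD i d = f (l.getD i d') := by
  rw [List.getD_eq_getElem _ _ (by simpa), List.getD_eq_getElem _ _ h, List.getElem_map]

lemma pvRow_len (matrix : List (List String))
    (hpre : ∀ row ∈ matrix, matrix.length ≤ row.length) (i : Nat) (hi : i < matrix.length) :
    matrix.length ≤ (matrix.getD i []).length := by
  refine hpre _ ?_
  rw [List.getD_eq_getElem _ _ hi]
  exact List.getElem_mem hi

lemma pvRowT_len (matrix : List (List String))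
    (hpre : ∀ row ∈ matrix, matrix.length ≤ row.length) (i : Nat) (hi : i < matrix.length) :
    (pvRowT matrix matrix.length i).length = matrix.length := by
  have := pvRow_len matrix hpre i hi
  unfold pvRowT
  rw [List.length_take]
  omega

lemma pvColT_len (matrix : List (List String)) (n j : Nat) :
    (pvColT matrix n j).length = matrix.length := by
  simp [pvColT]

lemma pvRowT_getD (matrix : List (List String))
    (hpre : ∀ row ∈ matrix, matrix.length ≤ row.length) (i j : Nat)
    (hi : i < matrix.length) (hj : j < matrix.length) (d : String) :
    (pvRowT matrix matrix.length i).getD j d = pvCellN matrix i j := by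
  have hlen := pvRow_len matrix hpre i hi
  unfold pvRowT pvCellN
  have h1 : j < (List.take matrix.length (matrix.getD i [])).length := by
    rw [List.length_take]; omega
  calc (List.take matrix.length (matrix.getD i [])).getD j d
      = (List.take matrix.length (matrix.getD i []))[j] := List.getD_eq_getElem _ _ h1
    _ = (matrix.getD i [])[j] := List.getElem_take
    _ = (matrix.getD i []).getD j "" := (List.getD_eq_getElem _ _ (by omega)).symm

lemma pvColT_getD (matrix : List (List String))
    (hpre : ∀ row ∈ matrix, matrix.length ≤ row.length) (i j : Nat)
    (hi : i < matrix.length) (hj : j < matrix.length) (d : String) :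
    (pvColT matrix matrix.length i).getD j d = pvCellN matrix j i := by
  unfold pvColT
  rw [List.map_map]
  rw [pvGetD_map _ _ _ _ [] (by simpa using hj)]
  simp only [Function.comp_apply]
  show (pvRowT matrix matrix.length j).getD i "" = pvCellN matrix j i
  exact pvRowT_getD matrix hpre j i hj hi ""

lemma pvLand_iff (x : String) : pvLand x = true ↔ ¬(x = "~" ∨ x = " ") := by
  simp [pvLand, not_or]

lemma pvCell_natCast (matrix : List (List String)) (i j : Nat) :
    pvCell matrix (i : Int) (j : Int) = pvCellN matrix i j := by
  simp [pvCell, pvCellN]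

lemma pvA1_eq (matrix : List (List String)) (i j : Nat) :
    pvA1 matrix (i : Int) (j : Int)
      = if pvLand (pvCellN matrix i j) then 1 else 0 := by
  unfold pvA1
  rw [pvCell_natCast]
  by_cases h : pvCellN matrix i j = "~" ∨ pvCellN matrix i j = " "
  · have hl : ¬ pvLand (pvCellN matrix i j) = true := fun hc => (pvLand_iff _).mp hc h
    simp [h, hl]
  · have hl : pvLand (pvCellN matrix i j) = true := (pvLand_iff _).mpr h
    simp [h, hl]

lemma pvA2_eq (matrix : List (List String))
    (hpre : ∀ row ∈ matrix, matrix.length ≤ row.length) (i j : Nat)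
    (hi : i < matrix.length) (hj : j < matrix.length) :
    pvA2 matrix (matrix.length : Int) (i : Int) (j : Int)
      = pvContrib "~" (pvColT matrix matrix.length j) i
        + pvContrib "~" (pvRowT matrix matrix.length i) j := by
  have hn := matrix.length
  have htop : ((i : Int) = 0 ∨ pvCell matrix ((i : Int) - 1) (j : Int) = "~")
      ↔ ((if i = 0 then "~" else (pvColT matrix matrix.length j).getD (i - 1) "") = "~") := by
    cases i with
    | zero => simp
    | succ k =>
      have h1 : ((k + 1 : Nat) : Int) - 1 = (k : Int) := by push_cast; ring
      rw [h1, pvCell_natCast]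
      have h2 : (k + 1 : Nat) ≠ 0 := by omega
      rw [if_neg h2]
      have h3 : (pvColT matrix matrix.length j).getD (k + 1 - 1) ""
          = pvCellN matrix k j := by
        rw [show k + 1 - 1 = k from rfl]
        exact pvColT_getD matrix hpre j k hj (by omega) ""
      rw [h3]
      constructor
      · rintro (h | h)
        · exact absurd h (by exact_mod_cast h2)
        · exact h
      · intro h; exact Or.inr h
  have hbot : ((i : Int) = (matrix.length : Int) - 1 ∨ pvCell matrix ((i : Int) + 1) (j : Int) = "~")
      ↔ ((pvColT matrix matrix.length j).getD (i + 1) "~" = "~") := by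
    by_cases he : i + 1 = matrix.length
    · have h1 : (pvColT matrix matrix.length j).getD (i + 1) "~" = "~" :=
        List.getD_eq_default _ _ (by rw [pvColT_len]; omega)
      simp only [h1, iff_true]
      exact Or.inl (by push_cast; omega)
    · have h2 : (pvColT matrix matrix.length j).getD (i + 1) "~"
          = pvCellN matrix (i + 1) j := pvColT_getD matrix hpre j (i + 1) hj (by omega) _
      have h3 : ((i : Int) + 1) = ((i + 1 : Nat) : Int) := by push_cast; ring
      rw [h2, h3, pvCell_natCast]
      constructor
      · rintro (h | h)
        · exact absurd h (by push_cast; omega)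
        · exact h
      · intro h; exact Or.inr h
  have hleft : ((j : Int) = 0 ∨ pvCell matrix (i : Int) ((j : Int) - 1) = "~")
      ↔ ((if j = 0 then "~" else (pvRowT matrix matrix.length i).getD (j - 1) "") = "~") := by
    cases j with
    | zero => simp
    | succ k =>
      have h1 : ((k + 1 : Nat) : Int) - 1 = (k : Int) := by push_cast; ring
      rw [h1, pvCell_natCast]
      have h2 : (k + 1 : Nat) ≠ 0 := by omega
      rw [if_neg h2]
      have h3 : (pvRowT matrix matrix.length i).getD (k + 1 - 1) ""
          = pvCellN matrix i k := by
        rw [show k + 1 - 1 = k from rfl]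
        exact pvRowT_getD matrix hpre i k hi (by omega) ""
      rw [h3]
      constructor
      · rintro (h | h)
        · exact absurd h (by exact_mod_cast h2)
        · exact h
      · intro h; exact Or.inr h
  have hright : ((j : Int) = (matrix.length : Int) - 1 ∨ pvCell matrix (i : Int) ((j : Int) + 1) = "~")
      ↔ ((pvRowT matrix matrix.length i).getD (j + 1) "~" = "~") := by
    by_cases he : j + 1 = matrix.length
    · have h1 : (pvRowT matrix matrix.length i).getD (j + 1) "~" = "~" :=
        List.getD_eq_default _ _ (by rw [pvRowT_len matrix hpre i hi]; omega)
      simp only [h1, iff_true]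
      exact Or.inl (by push_cast; omega)
    · have h2 : (pvRowT matrix matrix.length i).getD (j + 1) "~"
          = pvCellN matrix i (j + 1) := pvRowT_getD matrix hpre i (j + 1) hi (by omega) _
      have h3 : ((j : Int) + 1) = ((j + 1 : Nat) : Int) := by push_cast; ring
      rw [h2, h3, pvCell_natCast]
      constructor
      · rintro (h | h)
        · exact absurd h (by push_cast; omega)
        · exact h
      · intro h; exact Or.inr h
  unfold pvA2 pvContrib
  rw [pvCell_natCast,
    pvColT_getD matrix hpre j i hj hi "", pvRowT_getD matrix hpre i j hi hj ""]
  by_cases h : pvCellN matrix i j = "~" ∨ pvCellN matrix i j = " "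
  · have hl : ¬ pvLand (pvCellN matrix i j) = true := fun hc => (pvLand_iff _).mp hc h
    simp [h, hl]
  · have hl : pvLand (pvCellN matrix i j) = true := (pvLand_iff _).mpr h
    simp only [h, not_false_eq_true, if_pos, hl]
    rw [if_congr htop rfl rfl, if_congr hbot rfl rfl, if_congr hleft rfl rfl,
      if_congr hright rfl rfl]
    ring

-- A as a double index sum of its per-cell increments
lemma pvA_sum (matrix : List (List String)) :
    calculate_area_and_perimeter matrix
      = (∑ i ∈ Finset.range matrix.length, ∑ j ∈ Finset.range matrix.length,
           pvA1 matrix (i : Int) (j : Int),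
         ∑ i ∈ Finset.range matrix.length, ∑ j ∈ Finset.range matrix.length,
           pvA2 matrix (matrix.length : Int) (i : Int) (j : Int)) := by
  unfold calculate_area_and_perimeter
  simp only [pvBody_eq, pvFoldl_pair_add, zero_add]
  rw [PySem.List.pyRange_zero_natCast]
  simp only [List.map_map, Function.comp_def, pvSum_listRange]

-- transitions of a row/column of length n as an index sum of contributions
lemma pvTransitions_sum (l : List String) :
    pvTransitions l = ∑ j ∈ Finset.range l.length, pvContrib "~" l j := by
  rw [pvTransitions_eq_G, pvG_eq_sum]
  have : pvLand "~" = false := rfl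
  simp [this]

-- the indexed square row [row[j] for j in range(size)] is row.take size when size ≤ len(row)
lemma pvIndexRow_eq_take (l : List String) (n : Nat) (h : n ≤ l.length) :
    (PySem.List.pyRange 0 (n : Int) 1).map (fun j => PySem.List.pyGetD l j "") = l.take n := by
  rw [PySem.List.pyRange_zero_natCast, List.map_map]
  refine List.ext_getElem ?_ ?_
  · simp; omega
  · intro i h1 h2
    simp only [List.getElem_map, List.getElem_range, Function.comp_apply,
      PySem.List.pyGetD_natCast, List.getElem_take]
    have hi : i < l.length := by simp at h2; omega
    exact List.getD_eq_getElem _ _ hi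

-- ===== VERDICT (by name: the statement is the Claim_ definition above) =====
theorem calculate_area_and_perimeter_spec : Claim_equal_calculate_area_and_perimeter := by
  intro matrix _ hpre
  unfold Spec_calculate_area_and_perimeter
  by_cases hnil : matrix = []
  · subst hnil; rfl
  have hfuel : ((matrix.map (fun row => row.take matrix.length)).headD []).length
      = matrix.length := by
    cases matrix with
    | nil => exact absurd rfl hnil
    | cons r0 rest =>
      have := hpre r0 (List.mem_cons_self ..)
      simp only [List.map_cons, List.headD_cons, List.length_take]
      omega
  have hne : (matrix.map (fun row => row.take matrix.length)) ≠ [] := by simpa using hnil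
  have hrows : ∀ r ∈ matrix.map (fun row => row.take matrix.length),
      r.length = matrix.length := by
    intro r hr
    simp only [List.mem_map] at hr
    obtain ⟨r0, hr0, rfl⟩ := hr
    have := hpre r0 hr0
    rw [List.length_take]; omega
  have hcols := pvTranspose_eq matrix.length _ hne hrows
  have hgridD : ∀ i, i < matrix.length →
      (matrix.map (fun row => row.take matrix.length)).getD i [] = pvRowT matrix matrix.length i := by
    intro i hi
    exact pvGetD_map _ _ _ _ [] (by simpa using hi)
  rw [pvA_sum]
  simp only [calculate_area_and_perimeter_alt]
  have hgrid : matrix.map (fun row =>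
        (PySem.List.pyRange 0 (matrix.length : Int) 1).map (fun j => PySem.List.pyGetD row j ""))
      = matrix.map (fun row => row.take matrix.length) :=
    List.map_congr_left (fun r hr => pvIndexRow_eq_take r matrix.length (hpre r hr))
  rw [hgrid, hfuel, hcols]
  rw [Prod.mk.injEq]
  refine ⟨?_, ?_⟩
  · -- area component
    rw [pvSum_map_getD (matrix.map (fun row => row.take matrix.length)) _ []]
    simp only [List.length_map]
    refine Finset.sum_congr rfl ?_
    intro i hi
    rw [Finset.mem_range] at hi
    rw [hgridD i hi, pvFilter_len, pvRowT_len matrix hpre i hi]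
    refine Finset.sum_congr rfl ?_
    intro j hj
    rw [Finset.mem_range] at hj
    rw [pvA1_eq, pvRowT_getD matrix hpre i j hi hj]
  · -- perimeter component
    have hA2 : (∑ i ∈ Finset.range matrix.length, ∑ j ∈ Finset.range matrix.length,
          pvA2 matrix (matrix.length : Int) (i : Int) (j : Int))
        = (∑ i ∈ Finset.range matrix.length, ∑ j ∈ Finset.range matrix.length,
             pvContrib "~" (pvRowT matrix matrix.length i) j)
          + (∑ j ∈ Finset.range matrix.length, ∑ i ∈ Finset.range matrix.length,
             pvContrib "~" (pvColT matrix matrix.length j) i) := by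
      calc (∑ i ∈ Finset.range matrix.length, ∑ j ∈ Finset.range matrix.length,
              pvA2 matrix (matrix.length : Int) (i : Int) (j : Int))
          = ∑ i ∈ Finset.range matrix.length, ∑ j ∈ Finset.range matrix.length,
              (pvContrib "~" (pvColT matrix matrix.length j) i
                + pvContrib "~" (pvRowT matrix matrix.length i) j) := by
            refine Finset.sum_congr rfl ?_
            intro i hi
            rw [Finset.mem_range] at hi
            refine Finset.sum_congr rfl ?_
            intro j hj
            rw [Finset.mem_range] at hj
            exact pvA2_eq matrix hpre i j hi hj
        _ = (∑ i ∈ Finset.range matrix.length, ∑ j ∈ Finset.range matrix.length,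
              pvContrib "~" (pvColT matrix matrix.length j) i)
            + (∑ i ∈ Finset.range matrix.length, ∑ j ∈ Finset.range matrix.length,
              pvContrib "~" (pvRowT matrix matrix.length i) j) := by
            simp [Finset.sum_add_distrib]
        _ = _ := by rw [Finset.sum_comm]; ring
    rw [hA2]
    congr 1
    · -- row transitions
      rw [pvSum_map_getD (matrix.map (fun row => row.take matrix.length)) _ []]
      simp only [List.length_map]
      refine Finset.sum_congr rfl ?_
      intro i hi
      rw [Finset.mem_range] at hi
      rw [hgridD i hi, pvTransitions_sum, pvRowT_len matrix hpre i hi]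
    · -- column transitions
      rw [List.map_map]
      rw [pvSum_listRange]
      refine Finset.sum_congr rfl ?_
      intro j hj
      rw [Finset.mem_range] at hj
      simp only [Function.comp_apply]
      show (∑ i ∈ Finset.range matrix.length,
          pvContrib "~" (pvColT matrix matrix.length j) i)
        = pvTransitions (pvColT matrix matrix.length j)
      rw [pvTransitions_sum, pvColT_len]
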